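-- pv_equiv track=rewrite | github.com/curl-grad-rag/Puzzle-AdventOfCode | functions.py | findPossiblePass
-- ===== SOURCE A (Python) =====
-- def findPossiblePass(low, high):
--     validOpts = []
--     for num in range(low, high):
--         digits = [int(x) for x in str(num)]
--         prev = 10
--         adjCheck = False
--         mono_inc = True
--         while (digits):
--             curr = digits.pop()
--             if (curr > prev):
--                 mono_inc = False
--                 break
--             elif (curr == prev):
--                 adjCheck = True
--             prev = curr
--         if (adjCheck and mono_inc):
--             validOpts.append(num)
--     return validOpts
-- ===== SOURCE B (Python) =====
-- def findPossiblePass(low, high):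
--     validOpts = []
--     if high <= low:
--         return validOpts
--     hi = high - 1
--     if hi < 10:
--         return validOpts
--     num_len = len(str(hi))
--
--     def extend(val, last, rem, pair):
--         if rem == 0:
--             if pair and low <= val < high:
--                 validOpts.append(val)
--             return
--         for d in range(last, 10):
--             extend(val * 10 + d, d, rem - 1, pair or d == last)
--
--     for length in range(2, num_len + 1):
--         for d in range(1, 10):
--             extend(d, d, length - 1, False)
--     return validOpts
-- ===== Notes on version B (the rewrite author's own statement) =====
-- stated objective: alternative
-- what changed: Instead of scanning every integer in [low, high) and testing its digits, B enumerates only the non-decreasing digit sequences (with at least one adjacent equal pair) directly by recursive digit extension, in increasing numeric order, filtering them into [low, high).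
import Mathlib
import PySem

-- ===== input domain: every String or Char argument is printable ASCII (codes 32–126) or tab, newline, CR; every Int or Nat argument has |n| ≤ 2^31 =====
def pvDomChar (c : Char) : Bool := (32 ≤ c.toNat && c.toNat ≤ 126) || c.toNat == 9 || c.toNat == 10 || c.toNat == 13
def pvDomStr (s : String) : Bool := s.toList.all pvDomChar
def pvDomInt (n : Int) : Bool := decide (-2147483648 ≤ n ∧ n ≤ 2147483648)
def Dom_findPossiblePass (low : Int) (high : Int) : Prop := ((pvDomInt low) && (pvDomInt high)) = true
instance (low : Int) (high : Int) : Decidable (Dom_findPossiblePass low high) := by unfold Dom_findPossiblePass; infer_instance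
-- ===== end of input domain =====

-- B enumerates only the non-decreasing digit sequences with an adjacent equal pair (recursive digit
-- extension, in increasing numeric order) and filters them into [low, high), instead of scanning
-- every integer of the range. Pre_ excludes ranges containing a negative number, where A raises
-- ValueError (int('-')).

-- ===== PORT A =====
-- the inner while-loop of A: pops digits from the end; returns (adjCheck, mono_inc)
def loopAux : List Int → Int → Bool → Bool × Bool
  | [], _, adj => (adj, true)
  | curr :: rest, prev, adj =>
    if curr > prev then (adj, false)
    else loopAux rest curr (adj || (curr == prev))

def findPossiblePass (low : Int) (high : Int) : List Int :=
  (PySem.List.pyRange low high 1).foldl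
    (fun validOpts num =>
      -- int(x) on each character of str(num): exact (= code - 48) for the digit characters
      -- str(num) produces when num ≥ 0; negative num (int('-') raises) is excluded by Pre_
      let digits : List Int := (PySem.Int.toStr num).toList.map (fun x => (x.toNat : Int) - 48)
      let r := loopAux digits.reverse 10 false
      if r.1 && r.2 then validOpts ++ [num] else validOpts)
    []

-- ===== PORT B =====
-- Source B's `extend`: appends every completion of the prefix `val` (last digit `last`, `rem` digits
-- still to place, `pair` = adjacent equal pair seen) that has a pair and lies in [low, high)
def extendB (low high : Int) : Int → Int → Nat → Bool → List Int → List Int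
  | val, _, 0, pair, acc =>
      if pair && decide (low ≤ val) && decide (val < high) then acc ++ [val] else acc
  | val, last, rem + 1, pair, acc =>
      (PySem.List.pyRange last 10 1).foldl
        (fun a d => extendB low high (val * 10 + d) d rem (pair || (d == last)) a) acc

def findPossiblePass_alt (low : Int) (high : Int) : List Int :=
  if high ≤ low then []
  else
    let hi := high - 1
    if hi < 10 then []
    else
      let numLen : Int := PySem.Str.len (PySem.Int.toStr hi)
      (PySem.List.pyRange 2 (numLen + 1) 1).foldl
        (fun acc L =>
          (PySem.List.pyRange 1 10 1).foldl
            -- Source B passes `length - 1` as the remaining-digit count; L ≥ 2 here so toNat is exact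
            (fun a d => extendB low high d d (L - 1).toNat false a) acc)
        []

-- ===== PRECONDITION & SPEC =====
-- A raises ValueError (int('-')) as soon as the range contains a negative number; those inputs
-- (low < 0 and low < high) are excluded. If the range is empty A returns [] even for low < 0.
def Pre_findPossiblePass (low : Int) (high : Int) : Prop := 0 ≤ low ∨ high ≤ low
instance (low : Int) (high : Int) : Decidable (Pre_findPossiblePass low high) := by
  unfold Pre_findPossiblePass; infer_instance

def pvWitness_findPossiblePass : Int × Int := (100, 200)

def Spec_findPossiblePass (low : Int) (high : Int) (out : List Int) : Prop := out = findPossiblePass_alt low high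
instance (low : Int) (high : Int) (out : List Int) : Decidable (Spec_findPossiblePass low high out) := by unfold Spec_findPossiblePass; infer_instance

-- ===== CLAIM (what is proved, stated in full; the proofs are below) =====
def Claim_equal_findPossiblePass : Prop := ∀ (low : Int) (high : Int), Dom_findPossiblePass low high → Pre_findPossiblePass low high → Spec_findPossiblePass low high (findPossiblePass low high)


-- ===== LEMMAS AND PROOFS =====

-- the little-endian digit list of v (Nat.digits is little-endian), as integers
def pvLD (v : Int) : List Int := List.map (fun d : Nat => (d : Int)) (Nat.digits 10 v.toNat)

-- big-endian digit extension: the value obtained by appending the digits t after prefix value a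
def pvExt (a : Int) (t : List Int) : Int := t.foldl (fun x d => x * 10 + d) a

-- "some adjacent equal pair" as a boolean on a list
def pvHasPair : List Int → Bool
  | a :: b :: r => (a == b) || pvHasPair (b :: r)
  | _ => false

-- A's adjacency flag accumulated right-to-left starting from prev = p
def pvAdjEq : Int → List Int → Bool
  | _, [] => false
  | p, c :: r => (c == p) || pvAdjEq c r

-- A's monotonicity check: p :: l is non-increasing
def pvNonInc : Int → List Int → Bool
  | _, [] => true
  | p, c :: r => decide (c ≤ p) && pvNonInc c r

-- the candidate lists B's `extend` generates, without the range filter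
def pvEe (val last : Int) : Nat → Bool → List Int
  | 0, pair => if pair then [val] else []
  | rem + 1, pair =>
      (PySem.List.pyRange last 10 1).flatMap
        (fun d => pvEe (val * 10 + d) d rem (pair || (d == last)))

-- A's per-number test (the body of A's loop as a predicate)
def pvP (num : Int) : Bool :=
  let digits : List Int := (PySem.Int.toStr num).toList.map (fun x => (x.toNat : Int) - 48)
  let r := loopAux digits.reverse 10 false
  r.1 && r.2

lemma loopAux_and (r : List Int) (p : Int) (a : Bool) :
    ((loopAux r p a).1 && (loopAux r p a).2) = ((a || pvAdjEq p r) && pvNonInc p r) := by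
  induction r generalizing p a with
  | nil => simp [loopAux, pvAdjEq, pvNonInc]
  | cons c rest ih =>
    simp only [loopAux, pvAdjEq, pvNonInc]
    by_cases hc : c > p
    · simp [hc, show ¬ c ≤ p by omega]
    · simp only [if_neg hc, ih, show c ≤ p by omega, decide_true, Bool.true_and]
      ac_rfl

lemma pvAdjEq_eq (p : Int) (l : List Int) : pvAdjEq p l = pvHasPair (p :: l) := by
  induction l generalizing p with
  | nil => rfl
  | cons c r ih => simp only [pvAdjEq, pvHasPair, ih]; rw [BEq.comm]

lemma pvNonInc_iff (p : Int) (l : List Int) :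
    pvNonInc p l = true ↔ List.IsChain (fun a b => b ≤ a) (p :: l) := by
  induction l generalizing p with
  | nil => simp [pvNonInc]
  | cons c r ih => simp [pvNonInc, List.isChain_cons_cons, ih]

lemma pvHasPair_iff (l : List Int) :
    pvHasPair l = true ↔ ¬ List.IsChain (fun a b : Int => a ≠ b) l := by
  match l with
  | [] => simp [pvHasPair]
  | [a] => simp [pvHasPair]
  | a :: b :: r =>
    simp [pvHasPair, List.isChain_cons_cons, pvHasPair_iff (b :: r)]
    tauto

lemma pvHasPair_reverse (l : List Int) : pvHasPair l.reverse = pvHasPair l := by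
  rw [Bool.eq_iff_iff, pvHasPair_iff, pvHasPair_iff, not_iff_not, List.isChain_reverse]
  exact ⟨fun h => h.imp fun _ _ hb => Ne.symm hb, fun h => h.imp fun _ _ hb => Ne.symm hb⟩

lemma pvHasPair_length {l : List Int} (h : pvHasPair l = true) : 2 ≤ l.length := by
  match l with
  | [] => simp [pvHasPair] at h
  | [a] => simp [pvHasPair] at h
  | a :: b :: r => simp

lemma toDigitsCore_eq (fuel n : Nat) (acc : List Char) (h : n < fuel) :
    Nat.toDigitsCore 10 fuel n acc
      = (if n = 0 then ['0'] else ((Nat.digits 10 n).map Nat.digitChar).reverse) ++ acc := by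
  induction fuel generalizing n acc with
  | zero => omega
  | succ f ih =>
    show (if n / 10 = 0 then (n % 10).digitChar :: acc
          else Nat.toDigitsCore 10 f (n / 10) ((n % 10).digitChar :: acc)) = _
    by_cases h0 : n = 0
    · subst h0; simp [Nat.digitChar]
    by_cases hd : n / 10 = 0
    · rw [if_pos hd, if_neg h0]
      rw [Nat.digits_def' (by norm_num : 1 < 10) (Nat.pos_of_ne_zero h0)]
      rw [hd]
      simp
    · rw [if_neg hd, if_neg h0]
      rw [ih (n / 10) _ (by omega)]
      rw [if_neg hd]
      rw [Nat.digits_def' (by norm_num : 1 < 10) (Nat.pos_of_ne_zero h0)]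
      simp

lemma digitChar_int (d : Nat) (h : d < 10) : ((Nat.digitChar d).toNat : Int) - 48 = (d : Int) := by
  interval_cases d <;> decide

lemma toDigits_eq (n : Nat) :
    Nat.toDigits 10 n = if n = 0 then ['0'] else ((Nat.digits 10 n).map Nat.digitChar).reverse := by
  have := toDigitsCore_eq (n + 1) n [] (by omega)
  simpa [Nat.toDigits] using this

lemma digitsA_eq {v : Int} (h : 0 ≤ v) :
    (PySem.Int.toStr v).toList.map (fun x => (x.toNat : Int) - 48)
      = if v = 0 then [0] else (pvLD v).reverse := by
  rw [PySem.Int.toList_toStr]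
  have hv : ¬ v < 0 := by omega
  rw [show PySem.Int.toChars v = Nat.toDigits 10 v.toNat by simp [PySem.Int.toChars, hv]]
  rw [toDigits_eq]
  by_cases h0 : v = 0
  · subst h0; decide
  · have : v.toNat ≠ 0 := by omega
    rw [if_neg this, if_neg h0]
    unfold pvLD
    simp only [List.map_reverse, List.map_map]
    congr 1
    apply List.map_congr_left
    intro d hd
    have := Nat.digits_lt_base (by norm_num) hd
    simpa using digitChar_int d this

lemma pvLD_lt (v : Int) : ∀ d ∈ pvLD v, 0 ≤ d ∧ d < 10 := by
  intro d hd
  unfold pvLD at hd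
  obtain ⟨n, hn, rfl⟩ := List.mem_map.mp hd
  have := Nat.digits_lt_base (by norm_num) hn
  omega

lemma pvP_char {v : Int} (h : 0 ≤ v) :
    pvP v = true ↔ (List.IsChain (· ≤ ·) ((pvLD v).reverse) ∧ pvHasPair ((pvLD v).reverse) = true) := by
  unfold pvP
  rw [digitsA_eq h]
  by_cases h0 : v = 0
  · subst h0
    rw [if_pos rfl]
    constructor
    · intro hP; exact absurd hP (by decide)
    · rintro ⟨-, hp⟩
      exact absurd hp (by simp [pvLD, pvHasPair])
  · rw [if_neg h0]
    simp only [List.reverse_reverse]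
    rw [loopAux_and]
    have hnil : pvLD v ≠ [] := by
      simp [pvLD, Nat.digits_ne_nil_iff_ne_zero]
      omega
    obtain ⟨c, r, hL⟩ := List.exists_cons_of_ne_nil hnil
    have hc10 : ¬ (c == (10:Int)) = true := by
      have := pvLD_lt v c (by rw [hL]; simp)
      simp; omega
    rw [Bool.and_eq_true, Bool.false_or, pvAdjEq_eq, pvNonInc_iff, pvHasPair_reverse, hL,
      List.isChain_cons_cons]
    have hc' := pvLD_lt v c (by rw [hL]; simp)
    constructor
    · rintro ⟨hp, -, hc2⟩
      refine ⟨List.isChain_reverse.mpr (hc2.imp fun _ _ hx => hx), ?_⟩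
      rcases (by simpa [pvHasPair] using hp : (10:Int) = c ∨ pvHasPair (c :: r) = true) with hx | hx
      · omega
      · exact hx
    · rintro ⟨hc2, hp⟩
      have hc3 := List.isChain_reverse.mp hc2
      exact ⟨by simp only [pvHasPair, Bool.or_eq_true]; exact Or.inr hp,
        by omega, hc3.imp fun _ _ hx => hx⟩

lemma pvP_false_small {v : Int} (h0 : 0 ≤ v) (h10 : v < 10) : pvP v = false := by
  rw [Bool.eq_false_iff]
  intro hP
  have := ((pvP_char h0).mp hP).2
  have hlen := pvHasPair_length this
  simp [pvLD] at hlen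
  have : (Nat.digits 10 v.toNat).length ≤ 1 := by
    rw [Nat.digits_length_le_iff (by norm_num)]
    omega
  omega

lemma extendB_eq (low high : Int) (val last : Int) (rem : Nat) (pair : Bool) (acc : List Int) :
    extendB low high val last rem pair acc
      = acc ++ (pvEe val last rem pair).filter (fun v => decide (low ≤ v) && decide (v < high)) := by
  induction rem generalizing val last pair acc with
  | zero =>
    show (if pair && decide (low ≤ val) && decide (val < high) then acc ++ [val] else acc) = _
    rcases pair <;> rcases hl : decide (low ≤ val) <;> rcases hh : decide (val < high) <;>
      simp [pvEe, List.filter, hl, hh]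
  | succ rem ih =>
    show (PySem.List.pyRange last 10 1).foldl
        (fun a d => extendB low high (val * 10 + d) d rem (pair || (d == last)) a) acc = _
    rw [show (fun (a : List Int) (d : Int) => extendB low high (val * 10 + d) d rem (pair || (d == last)) a)
        = (fun a d => a ++ (pvEe (val * 10 + d) d rem (pair || (d == last))).filter
            (fun v => decide (low ≤ v) && decide (v < high)))
      from funext fun a => funext fun d => ih (val * 10 + d) d (pair || (d == last)) a]
    rw [PySem.List.foldl_append_eq_flatMap]
    rw [pvEe, List.filter_flatMap]

lemma mem_pvEe {v val last : Int} {rem : Nat} {pair : Bool} :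
    v ∈ pvEe val last rem pair
      ↔ ∃ t : List Int, t.length = rem ∧ List.IsChain (· ≤ ·) (last :: t) ∧ (∀ d ∈ t, d < 10)
          ∧ (pair = true ∨ pvHasPair (last :: t) = true) ∧ v = pvExt val t := by
  induction rem generalizing val last pair with
  | zero =>
    constructor
    · intro hv
      rcases pair with - | -
      · simp [pvEe] at hv
      · refine ⟨[], rfl, by simp, by simp, Or.inl rfl, ?_⟩
        simpa [pvEe, pvExt] using hv
    · rintro ⟨t, ht, -, -, hp, rfl⟩
      rw [List.length_eq_zero_iff] at ht
      subst ht
      rcases hp with hp | hp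
      · simp [pvEe, hp, pvExt]
      · simp [pvHasPair] at hp
  | succ rem ih =>
    rw [pvEe, List.mem_flatMap]
    constructor
    · rintro ⟨d, hd, hv⟩
      rw [PySem.List.mem_pyRange_one] at hd
      obtain ⟨t', ht', hch, hlt, hp, rfl⟩ := ih.mp hv
      refine ⟨d :: t', by simp [ht'], ?_, ?_, ?_, rfl⟩
      · rw [List.isChain_cons_cons]; exact ⟨hd.1, hch⟩
      · intro x hx
        rcases List.mem_cons.mp hx with rfl | hx
        · exact hd.2
        · exact hlt _ hx
      · rcases hp with hp | hp
        · rcases Bool.or_eq_true_iff.mp hp with hp | hp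
          · exact Or.inl hp
          · refine Or.inr ?_
            simp only [pvHasPair, Bool.or_eq_true]
            exact Or.inl (by rw [beq_iff_eq] at hp ⊢; omega)
        · exact Or.inr (by simp only [pvHasPair, Bool.or_eq_true]; exact Or.inr hp)
    · rintro ⟨t, ht, hch, hlt, hp, rfl⟩
      rcases t with - | ⟨d, t'⟩
      · simp at ht
      rw [List.isChain_cons_cons] at hch
      refine ⟨d, PySem.List.mem_pyRange_one.mpr ⟨hch.1, hlt d (by simp)⟩, ?_⟩
      refine ih.mpr ⟨t', by simpa using ht, hch.2, fun x hx => hlt x (by simp [hx]), ?_, rfl⟩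
      rcases hp with hp | hp
      · exact Or.inl (Bool.or_eq_true_iff.mpr (Or.inl hp))
      · simp only [pvHasPair, Bool.or_eq_true] at hp
        rcases hp with hp | hp
        · exact Or.inl (Bool.or_eq_true_iff.mpr (Or.inr (by rw [beq_iff_eq] at hp ⊢; omega)))
        · exact Or.inr hp

lemma pvExt_bounds {t : List Int} (ht : ∀ d ∈ t, 0 ≤ d ∧ d < 10) (a : Int) :
    a * 10 ^ t.length ≤ pvExt a t ∧ pvExt a t < (a + 1) * 10 ^ t.length := by
  induction t generalizing a with
  | nil => simp [pvExt]
  | cons d t' ih =>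
    have hd := ht d (by simp)
    have h10 : (0:Int) < 10 ^ t'.length := by positivity
    obtain ⟨ih1, ih2⟩ := ih (fun x hx => ht x (by simp [hx])) (a * 10 + d)
    have hlow : a * 10 ^ (d :: t').length ≤ (a * 10 + d) * 10 ^ t'.length := by
      have : a * 10 * 10 ^ t'.length ≤ (a * 10 + d) * 10 ^ t'.length :=
        mul_le_mul_of_nonneg_right (by omega) (by positivity)
      calc a * 10 ^ (d :: t').length = a * 10 * 10 ^ t'.length := by ring_nf; rw [List.length_cons]; ring
        _ ≤ _ := this
    have hhigh : (a * 10 + d + 1) * 10 ^ t'.length ≤ (a + 1) * 10 ^ (d :: t').length := by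
      have : (a * 10 + d + 1) * 10 ^ t'.length ≤ (a + 1) * 10 * 10 ^ t'.length :=
        mul_le_mul_of_nonneg_right (by omega) (by positivity)
      calc (a * 10 + d + 1) * 10 ^ t'.length ≤ (a + 1) * 10 * 10 ^ t'.length := this
        _ = (a + 1) * 10 ^ (d :: t').length := by rw [List.length_cons]; ring
    constructor
    · exact le_trans hlow (by simpa [pvExt] using ih1)
    · exact lt_of_lt_of_le (by simpa [pvExt] using ih2) hhigh

lemma pvEe_bounds {v val last : Int} {rem : Nat} {pair : Bool}
    (h0 : 0 ≤ last) (h9 : last < 10) (hv : v ∈ pvEe val last rem pair) :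
    val * 10 ^ rem ≤ v ∧ v < (val + 1) * 10 ^ rem := by
  obtain ⟨t, ht, hch, hlt, -, rfl⟩ := mem_pvEe.mp hv
  have hpw := (List.isChain_iff_pairwise.mp hch)
  have hge : ∀ d ∈ t, 0 ≤ d ∧ d < 10 := by
    intro d hd
    have := (List.pairwise_cons.mp hpw).1 d hd
    exact ⟨by omega, hlt d hd⟩
  have := pvExt_bounds hge val
  rwa [ht] at this

lemma pyRange_pairwise (a b : Int) : List.Pairwise (· < ·) (PySem.List.pyRange a b 1) := by
  by_cases h : a < b
  · rw [PySem.List.pyRange_one_cons h]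
    rw [List.pairwise_cons]
    have : (b - (a+1)).toNat < (b - a).toNat := by omega
    refine ⟨fun x hx => ?_, pyRange_pairwise (a+1) b⟩
    have := PySem.List.mem_pyRange_one.mp hx
    omega
  · rw [show PySem.List.pyRange a b 1 = [] from
      List.eq_nil_iff_forall_not_mem.mpr fun x hx => by
        have := PySem.List.mem_pyRange_one.mp hx; omega]
    exact List.Pairwise.nil
termination_by (b - a).toNat
decreasing_by omega


lemma pvEe_pairwise (val last : Int) (rem : Nat) (pair : Bool)
    (h0 : 0 ≤ last) (h9 : last < 10) :
    List.Pairwise (· < ·) (pvEe val last rem pair) := by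
  induction rem generalizing val last pair with
  | zero => rcases pair <;> simp [pvEe]
  | succ rem ih =>
    rw [pvEe, List.pairwise_flatMap]
    constructor
    · intro d hd
      have := PySem.List.mem_pyRange_one.mp hd
      exact ih _ _ _ (by omega) this.2
    · refine (pyRange_pairwise last 10).imp_of_mem ?_
      intro d d' hd hd' hlt x hx y hy
      have hdm := PySem.List.mem_pyRange_one.mp hd
      have hdm' := PySem.List.mem_pyRange_one.mp hd'
      have hxb := pvEe_bounds (by omega) (by omega) hx
      have hyb := pvEe_bounds (by omega) (by omega) hy
      have hsep : (val * 10 + d + 1) * 10 ^ rem ≤ (val * 10 + d') * 10 ^ rem :=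
        mul_le_mul_of_nonneg_right (by omega) (by positivity)
      omega

lemma natFold_eq_ofDigits (ns : List Nat) (a : Nat) :
    ns.foldl (fun x d => x * 10 + d) a = a * 10 ^ ns.length + Nat.ofDigits 10 ns.reverse := by
  induction ns generalizing a with
  | nil => simp
  | cons d t ih =>
    rw [List.foldl_cons, ih, List.reverse_cons, Nat.ofDigits_append]
    simp
    ring

lemma pvExt_cast {bs : List Int} (hb : ∀ d ∈ bs, 0 ≤ d) {a : Int} (ha : 0 ≤ a) :
    pvExt a bs = ((bs.map Int.toNat).foldl (fun x d => x * 10 + d) a.toNat : Nat) := by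
  induction bs generalizing a with
  | nil => simp [pvExt]; omega
  | cons d t ih =>
    have hd := hb d (by simp)
    have h1 : pvExt a (d :: t) = pvExt (a * 10 + d) t := rfl
    rw [h1, ih (fun x hx => hb x (by simp [hx])) (by omega)]
    have h2 : (a * 10 + d).toNat = a.toNat * 10 + d.toNat := by omega
    simp only [List.map_cons, List.foldl_cons, h2]

-- decimal representation is unique: a big-endian digit list with nonzero head is (pvLD ·).reverse of its value
lemma digits_of_rep {bs : List Int} {d : Int} {t : List Int} (hbs : bs = d :: t)
    (h1 : 1 ≤ d) (hlt : ∀ x ∈ bs, x < 10) (hch : List.IsChain (· ≤ ·) bs) :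
    (pvLD (pvExt 0 bs)).reverse = bs ∧ 0 ≤ pvExt 0 bs := by
  have hpw := List.isChain_iff_pairwise.mp hch
  have hge : ∀ x ∈ bs, 0 ≤ x := by
    intro x hx
    rw [hbs] at hx hpw
    rcases List.mem_cons.mp hx with rfl | hx
    · omega
    · have := (List.pairwise_cons.mp hpw).1 x hx; omega
  have hb : ∀ x ∈ bs, 0 ≤ x ∧ x < 10 := fun x hx => ⟨hge x hx, hlt x hx⟩
  have hnn : 0 ≤ pvExt 0 bs := by
    have := (pvExt_bounds hb 0).1; simpa using this
  refine ⟨?_, hnn⟩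
  have hcast := pvExt_cast hge (le_refl (0:Int))
  set ns : List Nat := bs.map Int.toNat with hns
  have hfold : pvExt 0 bs = (Nat.ofDigits 10 ns.reverse : Nat) := by
    rw [hcast, natFold_eq_ofDigits]; simp
  have hnsne : ns ≠ [] := by simp [hns, hbs]
  have hdig : Nat.digits 10 (Nat.ofDigits 10 ns.reverse) = ns.reverse := by
    apply Nat.digits_ofDigits 10 (by norm_num)
    · intro x hx
      rw [List.mem_reverse, hns] at hx
      obtain ⟨y, hy, rfl⟩ := List.mem_map.mp hx
      have := hb y hy; omega
    · intro h
      rw [List.getLast_reverse]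
      have : ns.head (by simpa using hnsne) = d.toNat := by
        simp [hns, hbs]
      rw [this]
      omega
  rw [hfold]
  unfold pvLD
  rw [Int.toNat_natCast, hdig, ← List.map_reverse, List.reverse_reverse, hns, List.map_map]
  rw [show ((fun d : Nat => (d : Int)) ∘ Int.toNat) = fun x : Int => (x.toNat : Int) from rfl]
  apply List.map_congr_left ?_ |>.trans (List.map_id bs)
  intro x hx
  have := hge x hx
  simp only [id_eq]
  omega

lemma ext_of_digits {v : Int} (h0 : 0 ≤ v) :
    pvExt 0 ((pvLD v).reverse) = v := by
  have hge : ∀ x ∈ (pvLD v).reverse, 0 ≤ x := by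
    intro x hx
    rw [List.mem_reverse] at hx
    obtain ⟨y, _, rfl⟩ := List.mem_map.mp hx
    omega
  rw [pvExt_cast hge (le_refl (0:Int)), natFold_eq_ofDigits]
  have : ((pvLD v).reverse.map Int.toNat).reverse = Nat.digits 10 v.toNat := by
    rw [List.map_reverse, List.reverse_reverse]
    unfold pvLD
    rw [List.map_map]
    exact (List.map_congr_left fun x _ => by simp).trans (List.map_id _)
  rw [this]
  simp [Nat.ofDigits_digits]
  omega

lemma numLen_eq {hi : Int} (h : 1 ≤ hi) :
    PySem.Str.len (PySem.Int.toStr hi) = ((Nat.digits 10 hi.toNat).length : Int) := by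
  rw [PySem.Str.len_eq, PySem.Int.toList_toStr]
  have : PySem.Int.toChars hi = Nat.toDigits 10 hi.toNat := by
    simp [PySem.Int.toChars, show ¬ hi < 0 by omega]
  rw [this, toDigits_eq, if_neg (by omega)]
  simp

-- the candidate list of B for bound hi (= high - 1), before range filtering
def pvC (numLen : Int) : List Int :=
  (PySem.List.pyRange 2 (numLen + 1) 1).flatMap
    (fun L => (PySem.List.pyRange 1 10 1).flatMap (fun d => pvEe d d (L - 1).toNat false))

lemma alt_eq_filter {low high : Int} (hl : ¬ high ≤ low) (h10 : ¬ high - 1 < 10) :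
    findPossiblePass_alt low high
      = (pvC (PySem.Str.len (PySem.Int.toStr (high - 1)))).filter
          (fun v => decide (low ≤ v) && decide (v < high)) := by
  unfold findPossiblePass_alt
  rw [if_neg hl, if_neg h10]
  rw [show (fun (acc : List Int) (L : Int) => (PySem.List.pyRange 1 10 1).foldl
        (fun a d => extendB low high d d (L - 1).toNat false a) acc)
      = (fun acc L => acc ++ (PySem.List.pyRange 1 10 1).flatMap
          (fun d => (pvEe d d (L - 1).toNat false).filter
            (fun v => decide (low ≤ v) && decide (v < high))))
    from funext fun acc => funext fun L => by
      rw [show (fun (a : List Int) (d : Int) => extendB low high d d (L - 1).toNat false a)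
          = (fun a d => a ++ (pvEe d d (L - 1).toNat false).filter
              (fun v => decide (low ≤ v) && decide (v < high)))
        from funext fun a => funext fun d => extendB_eq low high d d _ false a]
      rw [PySem.List.foldl_append_eq_flatMap]]
  rw [PySem.List.foldl_append_eq_flatMap]
  unfold pvC
  rw [List.filter_flatMap]
  simp only [List.filter_flatMap, List.nil_append]

lemma a_eq_filter (low high : Int) :
    findPossiblePass low high = (PySem.List.pyRange low high 1).filter pvP := by
  unfold findPossiblePass
  rw [show (fun (validOpts : List Int) (num : Int) =>
      let digits : List Int := (PySem.Int.toStr num).toList.map (fun x => (x.toNat : Int) - 48)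
      let r := loopAux digits.reverse 10 false
      if r.1 && r.2 then validOpts ++ [num] else validOpts)
    = (fun validOpts num => if pvP num then validOpts ++ [num] else validOpts) from rfl]
  rw [show (fun (validOpts : List Int) (num : Int) => if pvP num then validOpts ++ [num] else validOpts)
    = (fun validOpts num => if pvP num = true then validOpts ++ [id num] else validOpts) from by
      funext a n; simp]
  rw [PySem.List.foldl_append_if]
  simp

lemma pvC_pairwise (numLen : Int) : List.Pairwise (· < ·) (pvC numLen) := by
  unfold pvC
  rw [List.pairwise_flatMap]
  constructor
  · intro L hL
    rw [List.pairwise_flatMap]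
    have hL2 := PySem.List.mem_pyRange_one.mp hL
    constructor
    · intro d hd
      have := PySem.List.mem_pyRange_one.mp hd
      exact pvEe_pairwise d d _ false (by omega) (by omega)
    · refine (pyRange_pairwise 1 10).imp_of_mem ?_
      intro d d' hd hd' hlt x hx y hy
      have hdm := PySem.List.mem_pyRange_one.mp hd
      have hdm' := PySem.List.mem_pyRange_one.mp hd'
      have hxb := pvEe_bounds (by omega) (by omega) hx
      have hyb := pvEe_bounds (by omega) (by omega) hy
      have hsep : (d + 1) * 10 ^ (L-1).toNat ≤ d' * 10 ^ (L-1).toNat :=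
        mul_le_mul_of_nonneg_right (by omega) (by positivity)
      omega
  · refine (pyRange_pairwise 2 (numLen + 1)).imp_of_mem ?_
    intro L L' hL hL' hlt x hx y hy
    have hLm := PySem.List.mem_pyRange_one.mp hL
    have hLm' := PySem.List.mem_pyRange_one.mp hL'
    obtain ⟨d, hd, hx⟩ := List.mem_flatMap.mp hx
    obtain ⟨d', hd', hy⟩ := List.mem_flatMap.mp hy
    have hdm := PySem.List.mem_pyRange_one.mp hd
    have hdm' := PySem.List.mem_pyRange_one.mp hd'
    have hxb := pvEe_bounds (by omega) (by omega) hx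
    have hyb := pvEe_bounds (by omega) (by omega) hy
    have hx10 : x < 10 ^ ((L-1).toNat + 1) := by
      have h1 : (d + 1) * 10 ^ (L-1).toNat ≤ 10 * 10 ^ (L-1).toNat :=
        mul_le_mul_of_nonneg_right (by omega) (by positivity)
      calc x < (d + 1) * 10 ^ (L-1).toNat := hxb.2
        _ ≤ 10 * 10 ^ (L-1).toNat := h1
        _ = 10 ^ ((L-1).toNat + 1) := by ring
    have hy10 : 10 ^ (L'-1).toNat ≤ y := by
      have h1 : 1 * 10 ^ (L'-1).toNat ≤ d' * 10 ^ (L'-1).toNat :=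
        mul_le_mul_of_nonneg_right (by omega) (by positivity)
      calc (10:Int) ^ (L'-1).toNat = 1 * 10 ^ (L'-1).toNat := by ring
        _ ≤ d' * 10 ^ (L'-1).toNat := h1
        _ ≤ y := hyb.1
    have hpow : (10:Int) ^ ((L-1).toNat + 1) ≤ 10 ^ (L'-1).toNat :=
      pow_le_pow_right₀ (by norm_num) (by omega)
    omega

lemma mem_pvC_iff {v hi : Int} (hhi : 10 ≤ hi) (hv0 : 0 ≤ v) (hvhi : v ≤ hi) :
    v ∈ pvC (PySem.Str.len (PySem.Int.toStr hi)) ↔ pvP v = true := by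
  rw [numLen_eq (by omega)]
  unfold pvC
  simp only [List.mem_flatMap, PySem.List.mem_pyRange_one]
  constructor
  · rintro ⟨L, hL, d, hd, hv⟩
    obtain ⟨t, hlen, hch, hlt, hp, hveq⟩ := mem_pvEe.mp hv
    have hp' : pvHasPair (d :: t) = true := by
      rcases hp with hp | hp
      · simp at hp
      · exact hp
    have hvext : v = pvExt 0 (d :: t) := by
      rw [hveq]
      show _ = List.foldl _ (0 * 10 + d) t
      norm_num [pvExt]
    have hrep := digits_of_rep rfl (by omega)
      (fun x hx => by
        rcases List.mem_cons.mp hx with rfl | hx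
        · omega
        · exact hlt x hx) hch
    rw [pvP_char hv0]
    rw [← hvext] at hrep
    rw [hrep.1]
    exact ⟨hch, hp'⟩
  · intro hP
    obtain ⟨hch, hp⟩ := (pvP_char hv0).mp hP
    have hbs2 := pvHasPair_length hp
    have hbsne : (pvLD v).reverse ≠ [] := by
      intro h; rw [h] at hbs2; simp at hbs2
    obtain ⟨c, t, hbs⟩ := List.exists_cons_of_ne_nil hbsne
    have hvne : v.toNat ≠ 0 := by
      intro h
      have : pvLD v = [] := by simp [pvLD, h]
      rw [this] at hbs; simp at hbs
    have hc1 : 1 ≤ c := by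
      have hlast : (pvLD v).getLast? = some c := by
        rw [← List.head?_reverse, hbs]; rfl
      have hdne : Nat.digits 10 v.toNat ≠ [] := by
        rw [Nat.digits_ne_nil_iff_ne_zero]; exact hvne
      unfold pvLD at hlast
      rw [List.getLast?_map, List.getLast?_eq_some_getLast hdne] at hlast
      have hnz := Nat.getLast_digit_ne_zero 10 hvne
      simp only [Option.map_some, Option.some.injEq] at hlast
      omega
    have hclt := pvLD_lt v
    have hlt9 : ∀ x ∈ c :: t, x < 10 := by
      intro x hx
      have : x ∈ (pvLD v).reverse := by rw [hbs]; exact hx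
      exact (hclt x (List.mem_reverse.mp this)).2
    have hL2 : 2 ≤ (c :: t).length := by rw [← hbs]; simpa using hbs2
    have hLlen : (c :: t).length = (Nat.digits 10 v.toNat).length := by
      rw [← hbs]
      simp [pvLD]
    refine ⟨((c :: t).length : Int), ?_, c, ⟨by omega, hlt9 c (by simp)⟩, ?_⟩
    · constructor
      · exact_mod_cast hL2
      · have hmono := Nat.le_length_digits_le 10 v.toNat hi.toNat (by omega)
        rw [hLlen]
        omega
    · rw [hbs] at hch hp
      apply mem_pvEe.mpr
      refine ⟨t, by simp only [List.length_cons]; omega, hch, fun x hx => hlt9 x (by simp [hx]), Or.inr hp, ?_⟩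
      have := ext_of_digits hv0
      rw [hbs] at this
      rw [← this]
      unfold pvExt
      rw [List.foldl_cons]
      norm_num

theorem findPossiblePass_spec' (low high : Int) (hpre : Pre_findPossiblePass low high) :
    findPossiblePass low high = findPossiblePass_alt low high := by
  by_cases hl : high ≤ low
  · rw [a_eq_filter]
    rw [show PySem.List.pyRange low high 1 = [] from List.eq_nil_iff_forall_not_mem.mpr
      fun x hx => by have := PySem.List.mem_pyRange_one.mp hx; omega]
    unfold findPossiblePass_alt
    rw [if_pos hl]
    rfl
  · have hlow : 0 ≤ low := by
      unfold Pre_findPossiblePass at hpre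
      rcases hpre with h | h
      · exact h
      · exact absurd h hl
    by_cases h10 : high - 1 < 10
    · have hB : findPossiblePass_alt low high = [] := by
        unfold findPossiblePass_alt
        rw [if_neg hl]
        simp only [if_pos h10]
      rw [hB, a_eq_filter, List.filter_eq_nil_iff]
      intro v hv
      have := PySem.List.mem_pyRange_one.mp hv
      simp [pvP_false_small (by omega : (0:Int) ≤ v) (by omega : v < 10)]
    · rw [a_eq_filter, alt_eq_filter hl h10]
      have hpwA := (pyRange_pairwise low high).filter pvP
      have hpwB := (pvC_pairwise (PySem.Str.len (PySem.Int.toStr (high - 1)))).filter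
        (fun v => decide (low ≤ v) && decide (v < high))
      refine List.Perm.eq_of_pairwise (le := (· < ·)) (fun a b _ _ h1 h2 => by omega) hpwA hpwB ?_
      rw [List.perm_ext_iff_of_nodup
        (hpwA.imp fun h => ne_of_lt h) (hpwB.imp fun h => ne_of_lt h)]
      intro v
      simp only [List.mem_filter, PySem.List.mem_pyRange_one, Bool.and_eq_true, decide_eq_true_eq]
      constructor
      · rintro ⟨⟨h1, h2⟩, hP⟩
        exact ⟨(mem_pvC_iff (by omega) (by omega) (by omega)).mpr hP, h1, h2⟩
      · rintro ⟨hC, h1, h2⟩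
        exact ⟨⟨h1, h2⟩, (mem_pvC_iff (by omega) (by omega) (by omega)).mp hC⟩

theorem findPossiblePass_spec : Claim_equal_findPossiblePass := by
  intro low high _ hpre
  unfold Spec_findPossiblePass
  exact findPossiblePass_spec' low high hpre
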